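-- pv_equiv track=rewrite | github.com/TimmStr/stockInformationProcurer | StockWebScrapingServicePython/Scraping/Scraper.py | string_to_digit
-- ===== SOURCE A (Python) =====
-- def string_to_digit(stock_value):
--     return_value = ''
--     for digit in stock_value:
--         if not digit.isdigit():
--             if digit == ',':
--                 return_value += '.'
--             elif digit == '-':
--                 return_value += '-'
--         else:
--             return_value = return_value + digit
--     return return_value
-- ===== SOURCE B (Python) =====
-- import re
--
-- def string_to_digit(stock_value):
--     return re.sub(r'[^0-9,-]', '', stock_value).replace(',', '.')
-- ===== Notes on version B (the rewrite author's own statement) =====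
-- stated objective: idiomatic
-- what changed: Replaced the per-character branch-and-append accumulator loop with a two-phase whole-string transform: a regex substitution strips everything but digits, commas and minus, then str.replace turns commas into dots.
import Mathlib
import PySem

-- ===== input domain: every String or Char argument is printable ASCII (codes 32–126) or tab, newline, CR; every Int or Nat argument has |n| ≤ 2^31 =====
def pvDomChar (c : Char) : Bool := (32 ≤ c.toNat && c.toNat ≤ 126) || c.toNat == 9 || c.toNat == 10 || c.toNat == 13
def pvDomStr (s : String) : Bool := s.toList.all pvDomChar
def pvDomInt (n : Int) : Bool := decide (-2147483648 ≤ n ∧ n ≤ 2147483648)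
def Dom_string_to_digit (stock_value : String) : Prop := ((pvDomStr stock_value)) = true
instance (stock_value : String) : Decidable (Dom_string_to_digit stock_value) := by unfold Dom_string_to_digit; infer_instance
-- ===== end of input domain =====

-- B replaces A's per-character branch-and-append accumulator loop by a two-phase
-- whole-string transform (strip unwanted characters, then rewrite commas to dots): idiomatic.

-- ===== PORT A =====
-- A: accumulator loop over the characters, appending per branch.
def string_to_digit (stock_value : String) : String :=
  stock_value.toList.foldl
    (fun return_value digit =>
      if ¬ (PySem.Chars.isdigit digit) then
        if digit == ',' then return_value ++ "."
        else if digit == '-' then return_value ++ "-"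
        else return_value
      else return_value ++ String.ofList [digit])
    ""

-- ===== PORT B =====
-- B: re.sub(r'[^0-9,-]','',s) = keep only digits/','/'-'; then .replace(',', '.') = map ',' to '.'.
def string_to_digit_alt (stock_value : String) : String :=
  String.ofList
    (((stock_value.toList.filter
        (fun c => PySem.Chars.isdigit c || c == ',' || c == '-')).map
      (fun c => if c == ',' then '.' else c)))

-- ===== PRECONDITION & SPEC =====
def Spec_string_to_digit (stock_value : String) (out : String) : Prop := out = string_to_digit_alt stock_value
instance (stock_value : String) (out : String) : Decidable (Spec_string_to_digit stock_value out) := by unfold Spec_string_to_digit; infer_instance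

-- ===== CLAIM (what is proved, stated in full; the proofs are below) =====
def Claim_equal_string_to_digit : Prop := ∀ (stock_value : String), Dom_string_to_digit stock_value → Spec_string_to_digit stock_value (string_to_digit stock_value)

-- ===== LEMMAS AND PROOFS =====

lemma std_loop (cs : List Char) (acc : String) :
    cs.foldl
      (fun return_value digit =>
        if ¬ (PySem.Chars.isdigit digit) then
          if digit == ',' then return_value ++ "."
          else if digit == '-' then return_value ++ "-"
          else return_value
        else return_value ++ String.ofList [digit])
      acc
    = acc ++ String.ofList
        ((cs.filter (fun c => PySem.Chars.isdigit c || c == ',' || c == '-')).map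
          (fun c => if c == ',' then '.' else c)) := by
  induction cs generalizing acc with
  | nil => simp
  | cons c cs ih =>
      simp only [List.foldl_cons, List.filter_cons]
      by_cases hdig : '0' ≤ c ∧ c ≤ '9'
      · have hc : ¬ c = ',' := by rintro rfl; exact absurd hdig (by decide)
        simp_all [PySem.Chars.isdigit, String.ext_iff]
      · by_cases hc : c = ',' <;> by_cases hm : c = '-' <;> subst_vars <;>
          simp_all [PySem.Chars.isdigit, String.ext_iff]
        rw [if_neg (fun h => absurd (hdig h.1) (not_lt.2 h.2))]

-- ===== VERDICT (by name: the statement is the Claim_ definition above) =====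
theorem string_to_digit_spec : Claim_equal_string_to_digit := by
  intro s _
  show string_to_digit s = string_to_digit_alt s
  unfold string_to_digit string_to_digit_alt
  rw [std_loop]
  simp
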